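-- pv_equiv track=rewrite | github.com/pxpxkao/NLP_Lab | transformer/post_process.py | get_longest
-- ===== SOURCE A (Python) =====
-- def get_longest(line, tag):
--     longest, p = [], [-1, 0]
--     for idx, e in enumerate(line):
--         if e == tag and p[0] == -1:
--             p[0] = idx
--         elif e == tag and idx == len(line)-1 and p[0] != -1:
--             p[1] = idx
--             longest.append(p)
--         elif e != tag and p[0] != -1:
--             p[1] = idx - 1
--             longest.append(p)
--             p = [-1, 0]
--     longest = sorted(longest, key = lambda x:x[1]-x[0]+1, reverse=True)
--     if len(longest):
--         return longest[0]
--     else: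
--         return None
-- ===== SOURCE B (Python) =====
-- def get_longest(line, tag):
--     best = None
--     start = None
--     for i, e in enumerate(line):
--         if e == tag:
--             if start is None:
--                 start = i
--             if best is None or i - start > best[1] - best[0]:
--                 best = [start, i]
--         else:
--             start = None
--     return best
-- ===== Notes on version B (the rewrite author's own statement) =====
-- stated objective: alternative
-- what changed: B tracks the current run and the first longest run in one linear pass with O(1) extra state, instead of collecting all runs into a list and stable-sorting it by length to take the head.
-- intended difference: When the only occurrence of tag in line is its last element, A returns None because its elif chain never records a run that starts at the last index, while B returns [len(line)-1, len(line)-1], the actual (longest) run, which is clearly the intended value. — e.g. on get_longest(["x", "t"], "t"): A returns none, B returns some [1, 1]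
import Mathlib
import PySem

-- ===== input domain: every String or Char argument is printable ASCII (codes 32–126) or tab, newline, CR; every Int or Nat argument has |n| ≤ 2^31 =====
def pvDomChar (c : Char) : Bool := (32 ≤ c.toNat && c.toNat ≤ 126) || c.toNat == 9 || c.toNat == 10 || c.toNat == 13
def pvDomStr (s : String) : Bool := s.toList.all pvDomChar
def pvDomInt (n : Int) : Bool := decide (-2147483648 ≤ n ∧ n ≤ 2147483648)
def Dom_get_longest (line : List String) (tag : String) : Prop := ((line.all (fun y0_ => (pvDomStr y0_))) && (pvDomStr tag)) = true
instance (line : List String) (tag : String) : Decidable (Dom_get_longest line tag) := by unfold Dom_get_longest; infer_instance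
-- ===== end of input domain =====

-- B replaces A's collect-all-runs-then-stable-sort-by-length with a single linear pass keeping the
-- current run start and the first longest run (alternative algorithm, O(1) extra state, no sort);
-- on inputs whose only tag occurrence is the last element A returns None (its elif chain never
-- records a run starting at the last index) while B returns that run — stated as D_ below.


-- ===== PORT A =====
-- loop body of A's for-loop (state = (longest, p)); n = len(line)
def pvStepA (tag : String) (n : Int) (s : List (Int × Int) × (Int × Int)) (ie : Int × String) : List (Int × Int) × (Int × Int) :=
  if ie.2 = tag ∧ s.2.1 = -1 then (s.1, (ie.1, s.2.2))
  else if ie.2 = tag ∧ ie.1 = n - 1 ∧ s.2.1 ≠ -1 then (s.1 ++ [(s.2.1, ie.1)], (s.2.1, ie.1))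
  else if ie.2 ≠ tag ∧ s.2.1 ≠ -1 then (s.1 ++ [(s.2.1, ie.1 - 1)], (-1, 0))
  else s

def get_longest (line : List String) (tag : String) : Option (List Int) :=
  let n : Int := line.length
  let st := (PySem.List.enumerate line).foldl (pvStepA tag n) ([], (-1, 0))
  let longest := PySem.List.sorted st.1 (fun x => x.2 - x.1 + 1) true
  match PySem.List.pyGet? longest 0 with
  | some r => some [r.1, r.2]
  | none => none

-- ===== PORT B =====
-- loop body of B's for-loop (state = (best, start))
def pvStepB (tag : String) (s : Option (Int × Int) × Option Int) (ie : Int × String) : Option (Int × Int) × Option Int :=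
  if ie.2 = tag then
    let start := match s.2 with | none => ie.1 | some v => v
    let best := match s.1 with
      | none => some (start, ie.1)
      | some b => if ie.1 - start > b.2 - b.1 then some (start, ie.1) else some b
    (best, some start)
  else (s.1, none)

def get_longest_alt (line : List String) (tag : String) : Option (List Int) :=
  (((PySem.List.enumerate line).foldl (pvStepB tag) (none, none)).1).map (fun b => [b.1, b.2])

-- ===== PRECONDITION & SPEC =====
-- When the only occurrence of tag in line is its last element, A returns none (its elif chain never
-- records a run that starts at the last index) while B returns [len-1, len-1], the actual longest run,
-- which is the intended value.
def D_get_longest (line : List String) (tag : String) : Prop :=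
  line ≠ [] ∧ line.getLast? = some tag ∧ tag ∉ line.dropLast
instance (line : List String) (tag : String) : Decidable (D_get_longest line tag) := by
  unfold D_get_longest; infer_instance

def Spec_get_longest (line : List String) (tag : String) (out : Option (List Int)) : Prop :=
  ¬ D_get_longest line tag → out = get_longest_alt line tag
instance (line : List String) (tag : String) (out : Option (List Int)) : Decidable (Spec_get_longest line tag out) := by unfold Spec_get_longest; infer_instance

def pvDiffWitness_get_longest : List String × String := (["x", "t"], "t")
def pvDiffWitnessOut_get_longest : (Option (List Int)) × (Option (List Int)) := (none, some [1, 1])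

-- ===== CLAIM (what is proved, stated in full; the proofs are below) =====
def Claim_unchanged_get_longest : Prop := ∀ (line : List String) (tag : String), Dom_get_longest line tag → Spec_get_longest line tag (get_longest line tag)
def Claim_changed_get_longest : Prop := Dom_get_longest (pvDiffWitness_get_longest.1) (pvDiffWitness_get_longest.2) ∧ D_get_longest (pvDiffWitness_get_longest.1) (pvDiffWitness_get_longest.2) ∧ get_longest (pvDiffWitness_get_longest.1) (pvDiffWitness_get_longest.2) = pvDiffWitnessOut_get_longest.1 ∧ get_longest_alt (pvDiffWitness_get_longest.1) (pvDiffWitness_get_longest.2) = pvDiffWitnessOut_get_longest.2 ∧ pvDiffWitnessOut_get_longest.1 ≠ pvDiffWitnessOut_get_longest.2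
def Claim_exact_get_longest : Prop := ∀ (line : List String) (tag : String), Dom_get_longest line tag → D_get_longest line tag → get_longest line tag ≠ get_longest_alt line tag

-- ===== LEMMAS AND PROOFS =====

-- "first longest run": the fold B effectively performs on the list of runs
def pvKey (r : Int × Int) : Int := r.2 - r.1 + 1
def pvStep (c : Option (Int × Int)) (x : Int × Int) : Option (Int × Int) :=
  match c with
  | none => some x
  | some b => if pvKey b < pvKey x then some x else some b
def pvFsm (L : List (Int × Int)) : Option (Int × Int) := L.foldl pvStep none

theorem pvFsm_append (L : List (Int × Int)) (r : Int × Int) :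
    pvFsm (L ++ [r]) = pvStep (pvFsm L) r := by
  simp [pvFsm, List.foldl_append]

theorem pvFoldl_step_some (L : List (Int × Int)) (b : Int × Int) :
    L.foldl pvStep (some b) = some (L.foldl (fun c x => if pvKey c < pvKey x then x else c) b) := by
  induction L generalizing b with
  | nil => rfl
  | cons x t ih =>
    simp only [List.foldl_cons, pvStep]
    split_ifs <;> exact ih _

theorem pvFoldl_plain_mem (L : List (Int × Int)) (b : Int × Int) :
    L.foldl (fun c x => if pvKey c < pvKey x then x else c) b = b ∨
      L.foldl (fun c x => if pvKey c < pvKey x then x else c) b ∈ L := by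
  induction L generalizing b with
  | nil => exact Or.inl rfl
  | cons x t ih =>
    simp only [List.foldl_cons]
    split_ifs
    · rcases ih x with h | h
      · exact Or.inr (by simp [h])
      · exact Or.inr (by simp [h])
    · rcases ih b with h | h
      · exact Or.inl h
      · exact Or.inr (by simp [h])

theorem pvFsm_mem (L : List (Int × Int)) (b : Int × Int) (h : pvFsm L = some b) : b ∈ L := by
  cases L with
  | nil => simp [pvFsm] at h
  | cons x t =>
    have : pvFsm (x :: t) = t.foldl pvStep (some x) := rfl
    rw [this, pvFoldl_step_some] at h
    rcases pvFoldl_plain_mem t x with h2 | h2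
    · simp [h2] at h; simp [← h]
    · rw [Option.some.injEq] at h; exact List.mem_cons_of_mem _ (h ▸ h2)

theorem pvFsm_ne_nil (L : List (Int × Int)) (h : L ≠ []) : ∃ b, pvFsm L = some b := by
  cases L with
  | nil => exact absurd rfl h
  | cons x t =>
    have : pvFsm (x :: t) = t.foldl pvStep (some x) := rfl
    rw [this, pvFoldl_step_some]
    exact ⟨_, rfl⟩

theorem pvFsm_no_improve (L : List (Int × Int)) (b r : Int × Int)
    (h : pvFsm L = some b) (hk : pvKey r ≤ pvKey b) : pvFsm (L ++ [r]) = pvFsm L := by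
  rw [pvFsm_append, h]
  simp only [pvStep]
  split_ifs with h1
  · omega
  · rfl

theorem pvFsm_bump (L : List (Int × Int)) (r r' : Int × Int)
    (h1 : r.1 = r'.1) (h2 : r.2 ≤ r'.2) : pvStep (pvFsm (L ++ [r])) r' = pvFsm (L ++ [r']) := by
  rw [pvFsm_append, pvFsm_append]
  cases hL : pvFsm L with
  | none =>
    simp only [pvStep]
    by_cases h : pvKey r < pvKey r'
    · simp [h]
    · have he : r = r' := Prod.ext h1 (by unfold pvKey at h; omega)
      simp [he]
  | some b =>
    by_cases hbr : pvKey b < pvKey r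
    · by_cases hrr : pvKey r < pvKey r'
      · have hbr' : pvKey b < pvKey r' := lt_trans hbr hrr
        simp [pvStep, hbr, hrr, hbr']
      · have he : r = r' := Prod.ext h1 (by unfold pvKey at hrr; omega)
        subst he
        simp [pvStep, hbr]
    · simp only [pvStep, if_neg hbr]

theorem pvInsertBy_head (bef : (Int × Int) → (Int × Int) → Bool) (x b : Int × Int)
    (ys : List (Int × Int)) (h : ys.head? = some b) :
    (PySem.List.insertBy bef x ys).head? = some (if bef x b then x else b) := by
  cases ys with
  | nil => simp at h
  | cons y t =>
    simp only [List.head?_cons, Option.some.injEq] at h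
    subst h
    simp only [PySem.List.insertBy]
    split_ifs <;> simp

theorem pvFoldIns_head (bef : (Int × Int) → (Int × Int) → Bool) (xs : List (Int × Int)) :
    ∀ (acc : List (Int × Int)) (b : Int × Int), acc.head? = some b →
      ((xs.foldl (fun a x => PySem.List.insertBy bef x a) acc).head? =
        some (xs.foldl (fun c x => if bef x c then x else c) b)) := by
  induction xs with
  | nil => intro acc b h; simpa using h
  | cons x t ih =>
    intro acc b h
    simp only [List.foldl_cons]
    exact ih _ _ (pvInsertBy_head bef x b acc h)

theorem pvHead_sorted_rev (L : List (Int × Int)) :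
    (PySem.List.sorted L (fun x => x.2 - x.1 + 1) true).head? = pvFsm L := by
  rw [PySem.List.sorted_rev_eq_foldl_insertBy]
  cases L with
  | nil => rfl
  | cons l0 rest =>
    have hins : PySem.List.insertBy
        (fun a b => decide ((fun x : Int × Int => x.2 - x.1 + 1) b < (fun x : Int × Int => x.2 - x.1 + 1) a))
        l0 ([] : List (Int × Int)) = [l0] := rfl
    rw [List.foldl_cons, hins,
      pvFoldIns_head _ rest [l0] l0 rfl]
    have hfsm : pvFsm (l0 :: rest) = rest.foldl pvStep (some l0) := rfl
    rw [hfsm, pvFoldl_step_some]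
    congr 1
    apply List.foldl_ext
    intro c x hx
    simp [pvKey]

-- the coupling invariant between A's and B's loop states after processing the prefix `pre`
def pvInv (pre : List String) (tag : String) (n : Int) (L : List (Int × Int)) (p : Int × Int)
    (best : Option (Int × Int)) (stt : Option Int) : Prop :=
  (∀ r ∈ L, 1 ≤ pvKey r) ∧
  ( (p = (-1, 0) ∧ stt = none ∧ best = pvFsm L ∧ (L = [] → tag ∉ pre))
  ∨ (0 ≤ p.1 ∧ p.1 ≤ (pre.length : Int) - 1 ∧ stt = some p.1 ∧
      best = pvFsm (L ++ [(p.1, (pre.length : Int) - 1)]) ∧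
      ((pre.length : Int) = n → p.1 = n - 1) ∧
      (L = [] → tag ∉ pre.take p.1.toNat) ∧ pre.getLast? = some tag)
  ∨ (p.1 ≠ -1 ∧ stt = some p.1 ∧ best = pvFsm L ∧ (pre.length : Int) = n ∧ L ≠ []) )

theorem pvStepB_tag (tag : String) (best : Option (Int × Int)) (stt : Option Int) (i s0 : Int)
    (hs : (match stt with | none => i | some v => v) = s0) :
    pvStepB tag (best, stt) (i, tag) = (pvStep best (s0, i), some s0) := by
  cases best with
  | none => simp [pvStepB, hs, pvStep]
  | some b =>
    by_cases h : i - s0 > b.2 - b.1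
    · have h' : pvKey b < pvKey (s0, i) := by unfold pvKey; simp only; omega
      simp [pvStepB, hs, pvStep, h, h']
    · have h' : ¬ pvKey b < pvKey (s0, i) := by unfold pvKey; simp only; omega
      simp [pvStepB, hs, pvStep, h, h']

theorem pvStepB_nontag (tag x : String) (best : Option (Int × Int)) (stt : Option Int) (i : Int)
    (hx : x ≠ tag) : pvStepB tag (best, stt) (i, x) = (best, none) := by
  simp [pvStepB, hx]

theorem pvStepInv (pre : List String) (tag : String) (n : Int) (x : String)
    (L : List (Int × Int)) (p : Int × Int) (best : Option (Int × Int)) (stt : Option Int)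
    (hlt : (pre.length : Int) < n)
    (hinv : pvInv pre tag n L p best stt) :
    pvInv (pre ++ [x]) tag n
      (pvStepA tag n (L, p) ((pre.length : Int), x)).1
      (pvStepA tag n (L, p) ((pre.length : Int), x)).2
      (pvStepB tag (best, stt) ((pre.length : Int), x)).1
      (pvStepB tag (best, stt) ((pre.length : Int), x)).2 := by
  obtain ⟨hkeys, hcase⟩ := hinv
  rcases hcase with ⟨hp, hst, hbest, hL0⟩ | ⟨h0, h1, hst, hbest, himp, hL0, hlastpre⟩ |
    ⟨hne, _, _, hlen, _⟩
  · -- closed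
    by_cases hx : x = tag
    · have hA : pvStepA tag n (L, p) ((pre.length : Int), x) = (L, ((pre.length : Int), p.2)) := by
        simp [pvStepA, hx, hp]
      have hB : pvStepB tag (best, stt) ((pre.length : Int), x) =
          (pvStep best ((pre.length : Int), (pre.length : Int)), some (pre.length : Int)) := by
        rw [hx, hst]; exact pvStepB_tag tag best none _ _ rfl
      rw [hA, hB]
      dsimp only
      refine ⟨hkeys, Or.inr (Or.inl ⟨by positivity, ?_, rfl, ?_, ?_, ?_, ?_⟩)⟩
      · simp
      · have hl : (((pre ++ [x]).length : Int)) - 1 = (pre.length : Int) := by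
          push_cast [List.length_append, List.length_singleton]; ring
        rw [hl, hbest, ← pvFsm_append]
      · intro h
        simp only [List.length_append, List.length_cons, List.length_nil] at h
        push_cast at h; omega
      · intro hLnil
        have ht : ((pre.length : Int)).toNat = pre.length := by omega
        rw [ht, List.take_left]
        exact hL0 hLnil
      · simp [hx]
    · have hA : pvStepA tag n (L, p) ((pre.length : Int), x) = (L, p) := by
        simp [pvStepA, hx, hp]
      have hB := pvStepB_nontag tag x best stt (pre.length : Int) hx
      rw [hA, hB]
      dsimp only
      refine ⟨hkeys, Or.inl ⟨hp, rfl, hbest, ?_⟩⟩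
      intro hLnil
      simp only [List.mem_append, List.mem_singleton]
      rintro (h | h)
      · exact hL0 hLnil h
      · exact hx h.symm
  · -- pending
    have hp1 : p.1 ≠ -1 := by omega
    by_cases hx : x = tag
    · have hB : pvStepB tag (best, stt) ((pre.length : Int), x) =
          (pvStep best (p.1, (pre.length : Int)), some p.1) := by
        rw [hx, hst]; exact pvStepB_tag tag best (some p.1) _ _ rfl
      have hbump : pvStep best (p.1, (pre.length : Int)) =
          pvFsm (L ++ [(p.1, (pre.length : Int))]) := by
        rw [hbest]
        exact pvFsm_bump L (p.1, (pre.length : Int) - 1) (p.1, (pre.length : Int)) rfl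
          (by dsimp only; omega)
      by_cases hi : (pre.length : Int) = n - 1
      · have hA : pvStepA tag n (L, p) ((pre.length : Int), x) =
            (L ++ [(p.1, (pre.length : Int))], (p.1, (pre.length : Int))) := by
          simp [pvStepA, hx, hp1, hi]
        rw [hA, hB]
        dsimp only
        refine ⟨?_, Or.inr (Or.inr ⟨by simpa using hp1, rfl, by rw [hbump], ?_, by simp⟩)⟩
        · intro r hr
          rcases List.mem_append.mp hr with h | h
          · exact hkeys r h
          · simp only [List.mem_singleton] at h
            subst h; unfold pvKey; dsimp only; omega
        · simp only [List.length_append, List.length_cons, List.length_nil]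
          push_cast; omega
      · have hA : pvStepA tag n (L, p) ((pre.length : Int), x) = (L, p) := by
          simp [pvStepA, hx, hp1, hi]
        rw [hA, hB]
        dsimp only
        refine ⟨hkeys, Or.inr (Or.inl ⟨h0, ?_, rfl, ?_, ?_, ?_, ?_⟩)⟩
        · simp only [List.length_append, List.length_cons, List.length_nil]; push_cast; omega
        · have hl : (((pre ++ [x]).length : Int)) - 1 = (pre.length : Int) := by
            push_cast [List.length_append, List.length_singleton]; ring
          rw [hl, hbump]
        · intro h; exfalso
          simp only [List.length_append, List.length_cons, List.length_nil] at h
          push_cast at h; omega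
        · intro hLnil
          rw [List.take_append_of_le_length (by omega)]
          exact hL0 hLnil
        · simp [hx]
    · have hA : pvStepA tag n (L, p) ((pre.length : Int), x) =
          (L ++ [(p.1, (pre.length : Int) - 1)], (-1, 0)) := by
        simp [pvStepA, hx, hp1]
      have hB := pvStepB_nontag tag x best stt (pre.length : Int) hx
      rw [hA, hB]
      dsimp only
      refine ⟨?_, Or.inl ⟨rfl, rfl, hbest, by simp⟩⟩
      intro r hr
      rcases List.mem_append.mp hr with h | h
      · exact hkeys r h
      · simp only [List.mem_singleton] at h
        subst h; unfold pvKey; dsimp only; omega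
  · -- dirty: impossible, the input is exhausted
    exact absurd hlen (by omega)

theorem pvMaster (xs : List String) (pre : List String) (tag : String) (n : Int)
    (L : List (Int × Int)) (p : Int × Int) (best : Option (Int × Int)) (stt : Option Int)
    (hn : n = pre.length + xs.length)
    (hinv : pvInv pre tag n L p best stt) :
    pvInv (pre ++ xs) tag n
      ((PySem.List.enumerate xs pre.length).foldl (pvStepA tag n) (L, p)).1
      ((PySem.List.enumerate xs pre.length).foldl (pvStepA tag n) (L, p)).2
      ((PySem.List.enumerate xs pre.length).foldl (pvStepB tag) (best, stt)).1
      ((PySem.List.enumerate xs pre.length).foldl (pvStepB tag) (best, stt)).2 := by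
  induction xs generalizing pre L p best stt with
  | nil => simpa [PySem.List.enumerate_nil] using hinv
  | cons x rest ih =>
    rw [PySem.List.enumerate_cons]
    simp only [List.foldl_cons]
    have hlt : (pre.length : Int) < n := by
      simp only [List.length_cons] at hn; push_cast at hn ⊢; omega
    have hstep := pvStepInv pre tag n x L p best stt hlt hinv
    have hn' : n = (pre ++ [x]).length + rest.length := by
      simp only [List.length_append, List.length_cons, List.length_nil] at hn ⊢
      push_cast at hn ⊢; omega
    have := ih (pre ++ [x])
      (pvStepA tag n (L, p) ((pre.length : Int), x)).1
      (pvStepA tag n (L, p) ((pre.length : Int), x)).2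
      (pvStepB tag (best, stt) ((pre.length : Int), x)).1
      (pvStepB tag (best, stt) ((pre.length : Int), x)).2
      hn' hstep
    have hlen : ((pre ++ [x]).length : Int) = (pre.length : Int) + 1 := by
      simp [List.length_append]
    rw [hlen] at this
    simpa [List.append_assoc] using this

-- A skips over non-tag elements; B likewise
theorem pvSkipA (ys : List String) (tag : String) (n : Int) (s : Int) (L : List (Int × Int))
    (hys : tag ∉ ys) :
    (PySem.List.enumerate ys s).foldl (pvStepA tag n) (L, (-1, 0)) = (L, (-1, 0)) := by
  induction ys generalizing s with
  | nil => simp [PySem.List.enumerate_nil]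
  | cons y t ih =>
    have hy : y ≠ tag := fun h => hys (h ▸ List.mem_cons_self)
    have ht : tag ∉ t := fun h => hys (List.mem_cons_of_mem _ h)
    rw [PySem.List.enumerate_cons]
    simp only [List.foldl_cons]
    have hA : pvStepA tag n (L, (-1, 0)) (s, y) = (L, (-1, 0)) := by
      simp [pvStepA, hy]
    rw [hA]
    exact ih (s + 1) ht

theorem pvSkipB (ys : List String) (tag : String) (s : Int) (best : Option (Int × Int))
    (hys : tag ∉ ys) :
    (PySem.List.enumerate ys s).foldl (pvStepB tag) (best, none) = (best, none) := by
  induction ys generalizing s with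
  | nil => simp [PySem.List.enumerate_nil]
  | cons y t ih =>
    have hy : y ≠ tag := fun h => hys (h ▸ List.mem_cons_self)
    have ht : tag ∉ t := fun h => hys (List.mem_cons_of_mem _ h)
    rw [PySem.List.enumerate_cons]
    simp only [List.foldl_cons]
    rw [pvStepB_nontag tag y best none s hy]
    exact ih (s + 1) ht

-- A's return value in terms of pvFsm applied to its collected run list
theorem pvA_eq (line : List String) (tag : String) :
    get_longest line tag =
      (pvFsm (((PySem.List.enumerate line).foldl (pvStepA tag (line.length : Int))
        ([], (-1, 0))).1)).map (fun r => [r.1, r.2]) := by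
  unfold get_longest
  have h0 : ∀ (l : List (Int × Int)), PySem.List.pyGet? l 0 = l.head? := by
    intro l
    have : (0 : Int) = ((0 : Nat) : Int) := rfl
    rw [this, PySem.List.pyGet?_natCast]
    cases l <;> simp
  simp only [h0, pvHead_sorted_rev]
  cases pvFsm (((PySem.List.enumerate line).foldl (pvStepA tag (line.length : Int))
      ([], (-1, 0))).1) <;> simp

-- ===== VERDICT (by name: the statement is the Claim_ definition above) =====
theorem get_longest_spec : Claim_unchanged_get_longest := by
  intro line tag _ hnd
  have hinv0 : pvInv [] tag (line.length : Int) [] (-1, 0) none none := by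
    exact ⟨by simp, Or.inl ⟨rfl, rfl, rfl, by simp⟩⟩
  have hm := pvMaster line [] tag (line.length : Int) [] (-1, 0) none none (by simp) hinv0
  simp only [List.nil_append, List.length_nil, Nat.cast_zero] at hm
  obtain ⟨hkeys, hcase⟩ := hm
  rw [pvA_eq]
  unfold get_longest_alt
  rcases hcase with ⟨_, _, hbest, _⟩ | ⟨h0, h1, _, hbest, himp, hL0, hlast⟩ | ⟨_, _, hbest, _, _⟩
  · rw [hbest]
  · -- a run is still open at the end of the loop: it started at the last index
    have hp1 : (((PySem.List.enumerate line).foldl (pvStepA tag (line.length : Int))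
        ([], (-1, 0))).2).1 = (line.length : Int) - 1 := himp rfl
    rw [hp1] at hbest hL0
    by_cases hL : (((PySem.List.enumerate line).foldl (pvStepA tag (line.length : Int))
        ([], (-1, 0))).1) = []
    · exfalso
      apply hnd
      refine ⟨?_, hlast, ?_⟩
      · intro h; subst h
        simp only [PySem.List.enumerate_nil, List.foldl_nil] at h0
        omega
      · have h2 := hL0 hL
        rw [show ((line.length : Int) - 1).toNat = line.length - 1 by omega] at h2
        rw [List.dropLast_eq_take]
        exact h2
    · obtain ⟨b, hb⟩ := pvFsm_ne_nil _ hL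
      have hbmem := pvFsm_mem _ _ hb
      have hkb := hkeys b hbmem
      have : pvFsm ((((PySem.List.enumerate line).foldl (pvStepA tag (line.length : Int))
          ([], (-1, 0))).1) ++ [((line.length : Int) - 1, (line.length : Int) - 1)]) =
          pvFsm (((PySem.List.enumerate line).foldl (pvStepA tag (line.length : Int))
          ([], (-1, 0))).1) := by
        apply pvFsm_no_improve _ b _ hb
        unfold pvKey at hkb ⊢; simp only; omega
      rw [hbest, this]
  · rw [hbest]

theorem get_longest_changed : Claim_changed_get_longest := by
  unfold Claim_changed_get_longest; decide

theorem get_longest_tight : Claim_exact_get_longest := by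
  intro line tag _ hD
  obtain ⟨hne, hlast, hnot⟩ := hD
  have hlastval : line.getLast hne = tag := by
    have h2 : line.getLast? = some (line.getLast hne) := List.getLast?_eq_some_getLast hne
    rw [h2, Option.some.injEq] at hlast
    exact hlast
  have hsplit : line.dropLast ++ [tag] = line := by
    conv_rhs => rw [← List.dropLast_append_getLast hne]
    rw [hlastval]
  rw [pvA_eq]
  unfold get_longest_alt
  rw [← hsplit, PySem.List.enumerate_append, List.foldl_append, List.foldl_append,
    pvSkipA _ _ _ _ _ hnot, pvSkipB _ _ _ _ hnot,
    PySem.List.enumerate_cons, PySem.List.enumerate_nil]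
  simp only [List.foldl_cons, List.foldl_nil]
  have hA : pvStepA tag ((line.dropLast ++ [tag]).length : Int) ([], (-1, 0))
      ((0 : Int) + (line.dropLast.length : Int), tag) =
      ([], ((0 : Int) + (line.dropLast.length : Int), 0)) := by
    simp [pvStepA]
  have hB := pvStepB_tag tag none none ((0 : Int) + (line.dropLast.length : Int))
    ((0 : Int) + (line.dropLast.length : Int)) rfl
  rw [hA, hB]
  simp [pvFsm, pvStep]
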